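-- pv_equiv track=rewrite | github.com/pedrocolon93/adversarial-lms-contextual-commonsense-inference | adversarial-lms/kbs_to_text_unite_summary.py | replace_person_x
-- ===== SOURCE A (Python) =====
-- def replace_person_x(row):
--     row = str(row)
--     targets = ["PersonX","PersonY"]
--     replacements = ["Someone_A","Someone_B"]
--     for target in targets:
--         if target in row:
--             row = row.replace(target,replacements[targets.index(target)])
--     return row
-- ===== SOURCE B (Python) =====
-- def replace_person_x(row):
--     # One left-to-right pass: look at the 7-char window at each position and
--     # substitute via a token->replacement dict, instead of two full replace passes.
--     mapping = {"PersonX": "Someone_A", "PersonY": "Someone_B"}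
--     s = str(row)
--     out = []
--     i = 0
--     n = len(s)
--     while i < n:
--         tok = s[i:i + 7]
--         if tok in mapping:
--             out.append(mapping[tok])
--             i += 7
--         else:
--             out.append(s[i])
--             i += 1
--     return "".join(out)
-- ===== Notes on version B (the rewrite author's own statement) =====
-- stated objective: alternative
-- what changed: Replaces the two independent full-string .replace() passes with a single left-to-right scan that matches the 7-char window at each position against a token->replacement dict.
import Mathlib
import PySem

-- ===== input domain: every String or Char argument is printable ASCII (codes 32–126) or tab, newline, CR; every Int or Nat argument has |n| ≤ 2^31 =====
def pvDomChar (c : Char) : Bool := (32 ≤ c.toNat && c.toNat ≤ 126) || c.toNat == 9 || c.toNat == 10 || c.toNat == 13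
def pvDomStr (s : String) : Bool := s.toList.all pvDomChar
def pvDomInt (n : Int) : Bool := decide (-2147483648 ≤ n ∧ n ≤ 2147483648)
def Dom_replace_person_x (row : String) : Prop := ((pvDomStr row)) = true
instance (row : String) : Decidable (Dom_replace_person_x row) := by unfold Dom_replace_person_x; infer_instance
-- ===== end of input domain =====

-- B replaces A's two independent full-string .replace() passes by a single left-to-right
-- scan with a token->replacement table (alternative decomposition; same asymptotic cost).

-- ===== PORT A =====
-- the loop body's replacements[targets.index(target)]: index() cannot fail here
-- (target is drawn from targets), so the total getD never supplies its default.
def replace_person_x (row : String) : String :=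
  let targets : List String := ["PersonX", "PersonY"]
  let replacements : List String := ["Someone_A", "Someone_B"]
  targets.foldl (fun row target =>
    if PySem.Str.isIn target row then
      PySem.Str.replace row target
        (((PySem.List.index? targets target).bind
            (fun i => PySem.List.pyGet? replacements (Int.ofNat i))).getD "")
    else row) row

-- ===== PORT B =====
def pvScanB : List Char → List Char
  | [] => []
  | c :: t =>
      if List.take 7 (c :: t) = "PersonX".toList then
        "Someone_A".toList ++ pvScanB (t.drop 6)
      else if List.take 7 (c :: t) = "PersonY".toList then
        "Someone_B".toList ++ pvScanB (t.drop 6)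
      else c :: pvScanB t
termination_by cs => cs.length
decreasing_by
  all_goals simp

def replace_person_x_alt (row : String) : String :=
  String.ofList (pvScanB row.toList)

-- ===== PRECONDITION & SPEC =====
def Spec_replace_person_x (row : String) (out : String) : Prop := out = replace_person_x_alt row
instance (row : String) (out : String) : Decidable (Spec_replace_person_x row out) := by unfold Spec_replace_person_x; infer_instance

-- ===== CLAIM (what is proved, stated in full; the proofs are below) =====
def Claim_equal_replace_person_x : Prop := ∀ (row : String), Dom_replace_person_x row → Spec_replace_person_x row (replace_person_x row)

-- ===== LEMMAS AND PROOFS =====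

theorem pvGoNil (old new : List Char) (f : Nat) (acc : List Char) :
    PySem.Chars.replace.go old new f [] acc = acc.reverse := by
  cases f <;> rw [PySem.Chars.replace.go] <;> simp

-- fuel/accumulator irrelevance for PySem.Chars.replace.go
theorem pvGoSpec (old new : List Char) (hold : old ≠ []) :
    ∀ (n : Nat) (l : List Char), l.length ≤ n → ∀ (fuel₁ fuel₂ : Nat) (acc : List Char),
      l.length ≤ fuel₁ → l.length ≤ fuel₂ →
      PySem.Chars.replace.go old new fuel₁ l acc
        = acc.reverse ++ PySem.Chars.replace.go old new fuel₂ l [] := by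
  intro n
  induction n with
  | zero =>
    intro l hl fuel₁ fuel₂ acc h1 h2
    have : l = [] := List.eq_nil_of_length_eq_zero (Nat.le_zero.mp hl)
    subst this
    simp [pvGoNil]
  | succ n ih =>
    intro l hl fuel₁ fuel₂ acc h1 h2
    cases l with
    | nil => simp [pvGoNil]
    | cons c t =>
      obtain ⟨f1, rfl⟩ : ∃ f1, fuel₁ = f1 + 1 := by
        cases fuel₁ with
        | zero => simp at h1
        | succ f => exact ⟨f, rfl⟩
      obtain ⟨f2, rfl⟩ : ∃ f2, fuel₂ = f2 + 1 := by
        cases fuel₂ with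
        | zero => simp at h2
        | succ f => exact ⟨f, rfl⟩
      have holdlen : 1 ≤ old.length := by
        cases old with
        | nil => exact absurd rfl hold
        | cons a b => simp
      rw [PySem.Chars.replace.go, PySem.Chars.replace.go]
      by_cases hp : old.isPrefixOf (c :: t) = true
      · simp only [hp, if_pos]
        have hdl : (List.drop old.length (c :: t)).length ≤ n := by
          simp at hl ⊢; omega
        have hdl1 : (List.drop old.length (c :: t)).length ≤ f1 := by
          simp at h1 ⊢; omega
        have hdl2 : (List.drop old.length (c :: t)).length ≤ f2 := by
          simp at h2 ⊢; omega
        rw [ih _ hdl f1 f2 (new.reverse ++ acc) hdl1 hdl2,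
            ih _ hdl f2 f2 (new.reverse ++ []) hdl2 hdl2]
        simp
      · simp only [hp, if_neg, Bool.not_eq_true]
        have htl : t.length ≤ n := by simp at hl; omega
        have ht1 : t.length ≤ f1 := by simp at h1; omega
        have ht2 : t.length ≤ f2 := by simp at h2; omega
        rw [ih _ htl f1 f2 (c :: acc) ht1 ht2, ih _ htl f2 f2 [c] ht2 ht2]
        simp

theorem pvReplaceEq (old new l : List Char) (hold : old ≠ []) :
    PySem.Chars.replace l old new = PySem.Chars.replace.go old new l.length l [] := by
  rw [PySem.Chars.replace]
  simp [List.isEmpty_iff, hold]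

theorem pvReplaceNil (old new : List Char) (hold : old ≠ []) :
    PySem.Chars.replace [] old new = [] := by
  rw [pvReplaceEq _ _ _ hold]
  simp [pvGoNil]

theorem pvReplacePos (old new l : List Char) (hold : old ≠ [])
    (h : old.isPrefixOf l = true) :
    PySem.Chars.replace l old new
      = new ++ PySem.Chars.replace (l.drop old.length) old new := by
  cases l with
  | nil =>
    cases old with
    | nil => exact absurd rfl hold
    | cons a b => simp [List.isPrefixOf] at h
  | cons c t =>
    have holdlen : 1 ≤ old.length := by
      cases old with
      | nil => exact absurd rfl hold
      | cons a b => simp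
    rw [pvReplaceEq _ _ _ hold, pvReplaceEq _ _ _ hold]
    simp only [List.length_cons]
    rw [PySem.Chars.replace.go]
    simp only [h, if_pos]
    have hdl : (List.drop old.length (c :: t)).length ≤ t.length := by simp; omega
    rw [pvGoSpec old new hold t.length _ hdl t.length (List.drop old.length (c :: t)).length
        (new.reverse ++ []) hdl (le_refl _)]
    simp

theorem pvReplaceStep (old new : List Char) (c : Char) (t : List Char) (hold : old ≠ [])
    (h : old.isPrefixOf (c :: t) = false) :
    PySem.Chars.replace (c :: t) old new = c :: PySem.Chars.replace t old new := by
  rw [pvReplaceEq _ _ _ hold, pvReplaceEq _ _ _ hold]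
  simp only [List.length_cons]
  rw [PySem.Chars.replace.go]
  simp only [h]
  rw [pvGoSpec old new hold t.length t (le_refl _) t.length t.length [c] (le_refl _) (le_refl _)]
  simp

theorem pvReplaceId (old new : List Char) (hold : old ≠ []) :
    ∀ l, ¬ old <:+: l → PySem.Chars.replace l old new = l := by
  intro l
  induction l with
  | nil => intro _; exact pvReplaceNil old new hold
  | cons c t ih =>
    intro hinf
    have hp : old.isPrefixOf (c :: t) = false := by
      rw [Bool.eq_false_iff]
      intro hcon
      exact hinf (List.IsPrefix.isInfix (List.isPrefixOf_iff_prefix.mp hcon))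
    rw [pvReplaceStep old new c t hold hp]
    rw [ih (fun hi => hinf (hi.trans (List.infix_cons_iff.mpr (Or.inr (List.infix_refl t)))))]

theorem pvXchars : "PersonX".toList = ['P','e','r','s','o','n','X'] := rfl
theorem pvYchars : "PersonY".toList = ['P','e','r','s','o','n','Y'] := rfl
theorem pvAchars : "Someone_A".toList = ['S','o','m','e','o','n','e','_','A'] := rfl
theorem pvXne : "PersonX".toList ≠ [] := by rw [pvXchars]; simp
theorem pvYne : "PersonY".toList ≠ [] := by rw [pvYchars]; simp

-- if a nonempty suffix of "PersonY" is a prefix of replace l "PersonX" "Someone_A",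
-- it already was a prefix of l
theorem pvSuffixY :
    ∀ (n : Nat) (l : List Char), l.length ≤ n → ∀ (j : Nat), 1 ≤ j → j ≤ 6 →
      (("PersonY".toList.drop j).isPrefixOf
          (PySem.Chars.replace l "PersonX".toList "Someone_A".toList)) = true →
      (("PersonY".toList.drop j).isPrefixOf l) = true := by
  intro n
  induction n with
  | zero =>
    intro l hl j hj1 hj h
    have : l = [] := List.eq_nil_of_length_eq_zero (Nat.le_zero.mp hl)
    subst this
    rw [pvReplaceNil _ _ pvXne] at h
    interval_cases j <;> simp [pvYchars] at h
  | succ n ih =>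
    intro l hl j hj1 hj h
    cases l with
    | nil =>
      rw [pvReplaceNil _ _ pvXne] at h
      interval_cases j <;> simp [pvYchars] at h
    | cons c t =>
      by_cases hp : ("PersonX".toList).isPrefixOf (c :: t) = true
      · rw [pvReplacePos _ _ _ pvXne hp, pvAchars] at h
        interval_cases j <;> simp [pvYchars, List.isPrefixOf] at h
      · rw [pvReplaceStep _ _ _ _ pvXne (Bool.eq_false_iff.mpr hp)] at h
        have htl : t.length ≤ n := by simp at hl; omega
        interval_cases j
        all_goals (
          rw [pvYchars] at h ⊢
          simp only [List.drop, List.isPrefixOf] at h ⊢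
          obtain ⟨hc, hrest⟩ := Bool.and_eq_true_iff.mp h
          refine Bool.and_eq_true_iff.mpr ⟨hc, ?_⟩)
        · simpa using ih t htl 2 (by omega) (by omega) (by simpa [pvYchars] using hrest)
        · simpa using ih t htl 3 (by omega) (by omega) (by simpa [pvYchars] using hrest)
        · simpa using ih t htl 4 (by omega) (by omega) (by simpa [pvYchars] using hrest)
        · simpa using ih t htl 5 (by omega) (by omega) (by simpa [pvYchars] using hrest)
        · simpa using ih t htl 6 (by omega) (by omega) (by simpa [pvYchars] using hrest)
        · simp

-- stepping the Y-replacement over a prepended "Someone_A"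
theorem pvStepOverA (w : List Char) :
    PySem.Chars.replace ("Someone_A".toList ++ w) "PersonY".toList "Someone_B".toList
      = "Someone_A".toList ++ PySem.Chars.replace w "PersonY".toList "Someone_B".toList := by
  rw [pvAchars]
  simp only [List.cons_append, List.nil_append]
  repeat rw [pvReplaceStep _ _ _ _ pvYne (by simp [pvYchars, List.isPrefixOf])]

-- stepping the X-replacement over a prepended "PersonY"
theorem pvStepOverY (w : List Char) :
    PySem.Chars.replace ("PersonY".toList ++ w) "PersonX".toList "Someone_A".toList
      = "PersonY".toList ++ PySem.Chars.replace w "PersonX".toList "Someone_A".toList := by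
  rw [pvYchars]
  simp only [List.cons_append, List.nil_append]
  rw [pvReplaceStep _ _ _ _ pvXne (by simp [pvXchars, List.isPrefixOf])]
  repeat rw [pvReplaceStep _ _ _ _ pvXne (by simp [pvXchars, List.isPrefixOf])]

theorem pvMain : ∀ (n : Nat) (cs : List Char), cs.length ≤ n →
    PySem.Chars.replace (PySem.Chars.replace cs "PersonX".toList "Someone_A".toList)
      "PersonY".toList "Someone_B".toList = pvScanB cs := by
  intro n
  induction n with
  | zero =>
    intro cs hl
    have : cs = [] := List.eq_nil_of_length_eq_zero (Nat.le_zero.mp hl)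
    subst this
    rw [pvReplaceNil _ _ pvXne, pvReplaceNil _ _ pvYne, pvScanB]
  | succ n ih =>
    intro cs hl
    cases cs with
    | nil => rw [pvReplaceNil _ _ pvXne, pvReplaceNil _ _ pvYne, pvScanB]
    | cons c t =>
      rw [pvScanB]
      by_cases hX : ("PersonX".toList).isPrefixOf (c :: t) = true
      · have htake : List.take 7 (c :: t) = "PersonX".toList :=
          by have h7 := (List.prefix_iff_eq_take.mp (List.isPrefixOf_iff_prefix.mp hX)).symm
             rwa [show ("PersonX".toList).length = 7 from rfl] at h7
        rw [pvReplacePos _ _ _ pvXne hX, pvStepOverA]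
        simp only [htake, if_pos]
        have hdl : (List.drop ("PersonX".toList).length (c :: t)).length ≤ n := by
          rw [pvXchars]; simp at hl ⊢; omega
        rw [ih _ hdl]
        have : List.drop ("PersonX".toList).length (c :: t) = t.drop 6 := by
          rw [pvXchars]; rfl
        rw [this]
      · have htakeX : ¬ (List.take 7 (c :: t) = "PersonX".toList) := by
          intro hcon
          exact hX (List.isPrefixOf_iff_prefix.mpr
            (List.prefix_iff_eq_take.mpr (by rw [show ("PersonX".toList).length = 7 from rfl, ← hcon])))
        simp only [htakeX, if_false]
        by_cases hY : ("PersonY".toList).isPrefixOf (c :: t) = true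
        · have hpre := List.isPrefixOf_iff_prefix.mp hY
          obtain ⟨u, hu⟩ := hpre
          have htake : List.take 7 (c :: t) = "PersonY".toList :=
            by have h7 := (List.prefix_iff_eq_take.mp (List.isPrefixOf_iff_prefix.mp hY)).symm
               rwa [show ("PersonY".toList).length = 7 from rfl] at h7
          simp only [htake, if_pos]
          rw [← hu, pvStepOverY]
          rw [pvReplacePos _ _ _ pvYne (List.isPrefixOf_iff_prefix.mpr (List.prefix_append _ _))]
          rw [List.drop_left]
          have hun : u.length ≤ n := by
            have h7 := congrArg List.length hu
            simp [pvYchars] at h7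
            simp at hl; omega
          rw [ih _ hun]
          have : t.drop 6 = u := by
            have : List.drop 7 (c :: t) = u := by
              rw [← hu]; exact List.drop_left' (show ("PersonY".toList).length = 7 from rfl)
            simpa using this
          rw [this]
        · have htakeY : ¬ (List.take 7 (c :: t) = "PersonY".toList) := by
            intro hcon
            exact hY (List.isPrefixOf_iff_prefix.mpr
              (List.prefix_iff_eq_take.mpr (by rw [show ("PersonY".toList).length = 7 from rfl, ← hcon])))
          simp only [htakeY, if_false]
          rw [pvReplaceStep _ _ _ _ pvXne (Bool.eq_false_iff.mpr hX)]
          have htl : t.length ≤ n := by simp at hl; omega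
          have hY2 : ("PersonY".toList).isPrefixOf
              (c :: PySem.Chars.replace t "PersonX".toList "Someone_A".toList) = false := by
            rw [Bool.eq_false_iff]
            intro hcon
            apply hY
            rw [pvYchars] at hcon ⊢
            simp only [List.isPrefixOf] at hcon ⊢
            obtain ⟨hc, hrest⟩ := Bool.and_eq_true_iff.mp hcon
            refine Bool.and_eq_true_iff.mpr ⟨hc, ?_⟩
            have := pvSuffixY n t htl 1 (by omega) (by omega) (by rw [pvYchars]; simpa using hrest)
            rw [pvYchars] at this
            simpa using this
          rw [pvReplaceStep _ _ _ _ pvYne hY2, ih _ htl]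

theorem pvGuard (o nw s : String) (ho : o.toList ≠ []) :
    (if PySem.Str.isIn o s then PySem.Str.replace s o nw else s) = PySem.Str.replace s o nw := by
  by_cases h : PySem.Str.isIn o s = true
  · rw [if_pos h]
  · have hfalse : PySem.Str.isIn o s = false := Bool.eq_false_iff.mpr h
    rw [hfalse]
    simp only [Bool.false_eq_true, if_false]
    rw [PySem.Str.isIn_eq] at hfalse
    have hlist : PySem.Chars.replace s.toList o.toList nw.toList = s.toList :=
      pvReplaceId _ _ ho _ ((PySem.Chars.isIn_eq_false_iff _ _).mp hfalse)
    rw [PySem.Str.replace, hlist, String.ofList_toList]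

-- ===== VERDICT (by name: the statement is the Claim_ definition above) =====
theorem replace_person_x_spec : Claim_equal_replace_person_x := by
  intro row _
  unfold Spec_replace_person_x replace_person_x replace_person_x_alt
  simp only [List.foldl]
  rw [pvGuard _ _ _ pvYne, pvGuard _ _ _ pvXne]
  rw [show ((PySem.List.index? ["PersonX", "PersonY"] "PersonX").bind
        (fun i => PySem.List.pyGet? ["Someone_A", "Someone_B"] (Int.ofNat i))).getD ""
      = "Someone_A" from rfl]
  rw [show ((PySem.List.index? ["PersonX", "PersonY"] "PersonY").bind
        (fun i => PySem.List.pyGet? ["Someone_A", "Someone_B"] (Int.ofNat i))).getD ""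
      = "Someone_B" from rfl]
  rw [PySem.Str.replace, PySem.Str.toList_replace,
      pvMain row.toList.length row.toList (le_refl _)]
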